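-- pv_equiv track=rewrite | github.com/strengthen/LeetCode | Python/1183.py | maximumNumberOfOnes
-- ===== SOURCE A (Python) =====
-- def maximumNumberOfOnes(width: int, height: int, side: int, maxOnes: int) -> int:        # Soltuion: Fold Matrix
--         # Take 7*5, side=3, maxOnes=3 as example:
--             # . . .|. . .|.                 1 1 .|1 1 .|1
--             # . . .|. . .|. fold  6 4 4     1 . .|1 . .|1
--             # . . .|. . .|. ----\ 6 4 4 ==> . . .|. . .|.
--             # ------------- ----/ 3 2 2     -------------
--             # . . .|. . .|.         ||      1 1 .|1 1 .|1
--             # . . .|. . .|.         \/      1 . .|1 . .|1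
--             #                  6+6+4 = 16
--
--     # Matrix Horizonalize [:] -> [..]
--     if width<height:
--         width, height = height, width
--
--     # Fold
--     x,x0 = divmod(width,side)
--     v,v0 = divmod(height,side)
--     kount = [   x0*v0       , (side-x0)*v0,
--                 x0*(side-v0), (side-x0)*(side-v0)
--             ]
--
--     value = [   (x+1)*(v+1) , x*(v+1)   ,
--                 (x+1)*v     , x*v       ,
--             ]
--
--     # Sum the largest ones
--     ans = 0
--     for k,n in zip(kount, value):
--         if maxOnes > k:
--             ans += k*n
--             maxOnes -= k
--         else:
--             return ans + maxOnes *n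
--     return ans
-- ===== SOURCE B (Python) =====
-- def maximumNumberOfOnes(width: int, height: int, side: int, maxOnes: int) -> int:
--     # Orient by max/min instead of the swap, then allocate the budget
--     # recursively over the four fold-buckets with min() instead of an
--     # early-return if/else loop.
--     W, H = max(width, height), min(width, height)
--     q, r = divmod(W, side)
--     p, s = divmod(H, side)
--     buckets = [(r * s, (q + 1) * (p + 1)),
--                ((side - r) * s, q * (p + 1)),
--                (r * (side - s), (q + 1) * p),
--                ((side - r) * (side - s), q * p)]
--
--     def grab(budget, bs):
--         if not bs:
--             return 0
--         k, n = bs[0]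
--         t = min(budget, k)
--         return t * n + grab(budget - t, bs[1:])
--
--     return grab(maxOnes, buckets)
-- ===== Notes on version B (the rewrite author's own statement) =====
-- stated objective: alternative
-- what changed: B replaces A's conditional swap and early-return if/else loop with mutation by a max/min orientation and a recursive budget allocator over the four fold-buckets using min(), with no early exit and no mutated state.
import Mathlib
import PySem

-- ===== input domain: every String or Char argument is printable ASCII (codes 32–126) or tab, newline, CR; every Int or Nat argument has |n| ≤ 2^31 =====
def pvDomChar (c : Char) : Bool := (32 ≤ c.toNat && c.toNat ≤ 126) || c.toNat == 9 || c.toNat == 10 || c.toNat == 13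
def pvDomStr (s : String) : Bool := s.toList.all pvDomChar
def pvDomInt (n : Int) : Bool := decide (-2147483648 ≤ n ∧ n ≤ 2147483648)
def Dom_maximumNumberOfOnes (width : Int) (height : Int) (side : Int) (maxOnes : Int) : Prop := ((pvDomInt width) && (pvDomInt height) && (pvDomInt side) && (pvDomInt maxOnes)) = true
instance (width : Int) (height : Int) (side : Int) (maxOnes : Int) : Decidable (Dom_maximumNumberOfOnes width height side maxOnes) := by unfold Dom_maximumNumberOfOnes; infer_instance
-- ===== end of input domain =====

-- B replaces A's swap + early-return loop with a max/min orientation and a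
-- recursive min-based budget allocator over the four buckets; same O(1) cost.


-- ===== PORT A =====
-- the 'for k,n in zip(kount, value)' loop with early return: ans is the accumulator
def aLoop : List (Int × Int) → Int → Int → Int
  | [], _, ans => ans
  | (k, n) :: rest, maxOnes, ans =>
      if maxOnes > k then aLoop rest (maxOnes - k) (ans + k * n)
      else ans + maxOnes * n

def maximumNumberOfOnes (width : Int) (height : Int) (side : Int) (maxOnes : Int) : Int :=
  let (width, height) := if width < height then (height, width) else (width, height)
  let x := PySem.Int.floordiv width side
  let x0 := PySem.Int.mod width side
  let v := PySem.Int.floordiv height side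
  let v0 := PySem.Int.mod height side
  let kount := [x0 * v0, (side - x0) * v0, x0 * (side - v0), (side - x0) * (side - v0)]
  let value := [(x + 1) * (v + 1), x * (v + 1), (x + 1) * v, x * v]
  aLoop (kount.zip value) maxOnes 0

-- ===== PORT B =====
def grab : Int → List (Int × Int) → Int
  | _, [] => 0
  | budget, (k, n) :: bs =>
      let t := min budget k
      t * n + grab (budget - t) bs

def maximumNumberOfOnes_alt (width : Int) (height : Int) (side : Int) (maxOnes : Int) : Int :=
  let W := max width height
  let H := min width height
  let q := PySem.Int.floordiv W side
  let r := PySem.Int.mod W side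
  let p := PySem.Int.floordiv H side
  let s := PySem.Int.mod H side
  grab maxOnes [(r * s, (q + 1) * (p + 1)),
                ((side - r) * s, q * (p + 1)),
                (r * (side - s), (q + 1) * p),
                ((side - r) * (side - s), q * p)]

-- ===== PRECONDITION & SPEC =====
-- Pre_ excludes exactly side = 0, where Python's divmod raises ZeroDivisionError.
def Pre_maximumNumberOfOnes (width : Int) (height : Int) (side : Int) (maxOnes : Int) : Prop := side ≠ 0
instance (width : Int) (height : Int) (side : Int) (maxOnes : Int) : Decidable (Pre_maximumNumberOfOnes width height side maxOnes) := by unfold Pre_maximumNumberOfOnes; infer_instance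
def pvWitness_maximumNumberOfOnes : Int × Int × Int × Int := (7, 5, 3, 3)

def Spec_maximumNumberOfOnes (width : Int) (height : Int) (side : Int) (maxOnes : Int) (out : Int) : Prop := out = maximumNumberOfOnes_alt width height side maxOnes
instance (width : Int) (height : Int) (side : Int) (maxOnes : Int) (out : Int) : Decidable (Spec_maximumNumberOfOnes width height side maxOnes out) := by unfold Spec_maximumNumberOfOnes; infer_instance

-- ===== CLAIM (what is proved, stated in full; the proofs are below) =====
def Claim_equal_maximumNumberOfOnes : Prop := ∀ (width : Int) (height : Int) (side : Int) (maxOnes : Int), Dom_maximumNumberOfOnes width height side maxOnes → Pre_maximumNumberOfOnes width height side maxOnes → Spec_maximumNumberOfOnes width height side maxOnes (maximumNumberOfOnes width height side maxOnes)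

-- ===== LEMMAS AND PROOFS =====

-- When every bucket count is nonnegative, grab with budget 0 takes nothing.
lemma grab_zero (bs : List (Int × Int)) (h : ∀ kn ∈ bs, 0 ≤ kn.1) : grab 0 bs = 0 := by
  induction bs with
  | nil => simp [grab]
  | cons kn rest ih =>
      obtain ⟨k, n⟩ := kn
      have hk : 0 ≤ k := h (k, n) (by simp)
      have : min (0 : Int) k = 0 := by omega
      simp [grab, this, ih fun kn hm => h kn (by simp [hm])]

-- A's early-return loop equals B's min-based allocator on nonnegative counts.
lemma aLoop_eq_grab (bs : List (Int × Int)) (h : ∀ kn ∈ bs, 0 ≤ kn.1) :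
    ∀ m ans, aLoop bs m ans = ans + grab m bs := by
  induction bs with
  | nil => intro m ans; simp [aLoop, grab]
  | cons kn rest ih =>
      obtain ⟨k, n⟩ := kn
      intro m ans
      have hk : 0 ≤ k := h (k, n) (by simp)
      have hrest : ∀ kn ∈ rest, 0 ≤ kn.1 := fun kn hm => h kn (by simp [hm])
      by_cases hgt : m > k
      · have hmin : min m k = k := by omega
        simp only [aLoop, grab, if_pos hgt, hmin, ih hrest]
        ring
      · have hmin : min m k = m := by omega
        simp only [aLoop, grab, if_neg hgt, hmin]
        rw [show m - m = (0 : Int) by ring, grab_zero rest hrest]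
        ring

-- the four bucket counts are nonnegative for any nonzero side
lemma buckets_nonneg (side r s : Int) (hb : side ≠ 0)
    (hr : (0 < side → 0 ≤ r ∧ r < side) ∧ (side < 0 → side < r ∧ r ≤ 0))
    (hs : (0 < side → 0 ≤ s ∧ s < side) ∧ (side < 0 → side < s ∧ s ≤ 0)) :
    0 ≤ r * s ∧ 0 ≤ (side - r) * s ∧ 0 ≤ r * (side - s) ∧ 0 ≤ (side - r) * (side - s) := by
  rcases lt_or_gt_of_ne hb with hneg | hpos
  · obtain ⟨hr1, hr2⟩ := hr.2 hneg
    obtain ⟨hs1, hs2⟩ := hs.2 hneg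
    refine ⟨?_, ?_, ?_, ?_⟩ <;> nlinarith
  · obtain ⟨hr1, hr2⟩ := hr.1 hpos
    obtain ⟨hs1, hs2⟩ := hs.1 hpos
    exact ⟨mul_nonneg hr1 hs1, mul_nonneg (by omega) hs1,
           mul_nonneg hr1 (by omega), mul_nonneg (by omega) (by omega)⟩

lemma mod_bounds (a b : Int) :
    (0 < b → 0 ≤ PySem.Int.mod a b ∧ PySem.Int.mod a b < b) ∧
    (b < 0 → b < PySem.Int.mod a b ∧ PySem.Int.mod a b ≤ 0) := by
  constructor
  · intro hpos; exact ⟨PySem.Int.mod_nonneg a hpos, PySem.Int.mod_lt a hpos⟩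
  · intro hneg; exact PySem.Int.mod_neg_bounds a hneg

-- ===== VERDICT (by name: the statement is the Claim_ definition above) =====
theorem maximumNumberOfOnes_spec : Claim_equal_maximumNumberOfOnes := by
  intro width height side maxOnes _hDom hPre
  unfold Spec_maximumNumberOfOnes maximumNumberOfOnes maximumNumberOfOnes_alt
  by_cases hwl : width < height
  · simp only [if_pos hwl]
    have hW : max width height = height := by omega
    have hH : min width height = width := by omega
    rw [hW, hH]
    have hnn := buckets_nonneg side (PySem.Int.mod height side) (PySem.Int.mod width side) hPre
      (mod_bounds height side) (mod_bounds width side)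
    rw [aLoop_eq_grab _ (by simp only [List.zip]; intro kn hm; fin_cases hm <;> simp <;> omega)]
    simp [List.zip]
  · simp only [if_neg hwl]
    have hW : max width height = width := by omega
    have hH : min width height = height := by omega
    rw [hW, hH]
    have hnn := buckets_nonneg side (PySem.Int.mod width side) (PySem.Int.mod height side) hPre
      (mod_bounds width side) (mod_bounds height side)
    rw [aLoop_eq_grab _ (by simp only [List.zip]; intro kn hm; fin_cases hm <;> simp <;> omega)]
    simp [List.zip]
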